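-- pv_equiv track=rewrite | github.com/magahr/test_python_hack_2 | hack_3.py | fn_hack_3
-- ===== SOURCE A (Python) =====
-- def fn_hack_3(s):
--     result = s
--     leters1 = ["a","e","i","o","u","q","x","n","f","b"]
--     leters2 = ["@","3","¡","0","v","Q","X","N","F","B"]
--
--     for leter0 in result:
--         for i in range(len(leters1)):
--             if leter0 == leters1[i]:
--                result  = result.replace(leters1[i],leters2[i])
--     return result
-- ===== SOURCE B (Python) =====
-- def fn_hack_3(s):
--     mapping = dict(zip("aeiouqxnfb", "@3\u00a10vQXNFB"))
--     return "".join(mapping.get(c, c) for c in s)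
-- ===== Notes on version B (the rewrite author's own statement) =====
-- stated objective: faster
-- what changed: A rescans the 10-entry mapping for every character of s and calls whole-string replace() for each hit (many full passes over the string); B builds the char-to-char dict once and produces the result in a single pass with one dict lookup per character.
import Mathlib
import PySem

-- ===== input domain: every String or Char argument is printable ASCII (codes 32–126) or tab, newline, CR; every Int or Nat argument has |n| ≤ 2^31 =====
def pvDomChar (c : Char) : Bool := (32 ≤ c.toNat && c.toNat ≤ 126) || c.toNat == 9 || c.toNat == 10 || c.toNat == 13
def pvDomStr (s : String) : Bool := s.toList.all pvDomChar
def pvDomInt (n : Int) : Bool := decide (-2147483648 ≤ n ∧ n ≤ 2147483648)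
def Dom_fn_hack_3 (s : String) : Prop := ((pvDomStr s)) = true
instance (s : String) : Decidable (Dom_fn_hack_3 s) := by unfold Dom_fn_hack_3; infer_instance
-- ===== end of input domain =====

-- B replaces A's per-character mapping rescan and repeated whole-string replace() calls with a
-- dict built once and a single pass over s: one traversal instead of a replace() pass per hit.

-- ===== PORT A =====
-- Python's leters1/leters2 are lists of one-character strings; ported as lists of Char
-- (equality of one-char strings = Char equality; replace() gets them back as String.ofList [c]).
def hackLeters1 : List Char := ['a','e','i','o','u','q','x','n','f','b']
def hackLeters2 : List Char := ['@','3','¡','0','v','Q','X','N','F','B']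

def fn_hack_3 (s : String) : String :=
  -- 'for leter0 in result' iterates over the value result has when the loop starts, i.e. s
  s.toList.foldl (fun result leter0 =>
    (PySem.List.pyRange 0 (hackLeters1.length : Int) 1).foldl (fun result i =>
      -- leters1[i] / leters2[i]: i ∈ range(10) is always in range, so pyGet? is always some
      match PySem.List.pyGet? hackLeters1 i, PySem.List.pyGet? hackLeters2 i with
      | some c1, some c2 =>
          if leter0 = c1 then PySem.Str.replace result (String.ofList [c1]) (String.ofList [c2])
          else result
      | _, _ => result) result) s

-- ===== PORT B =====
-- mapping = dict(zip("aeiouqxnfb", "@3¡0vQXNFB"))  (the two string literals, as their char lists)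
def hackMap : PySem.Dict Char Char :=
  PySem.Dict.ofList (List.zip ['a','e','i','o','u','q','x','n','f','b']
                              ['@','3','¡','0','v','Q','X','N','F','B'])

-- ''.join(mapping.get(c, c) for c in s) : one pass, one dict lookup per character
def fn_hack_3_alt (s : String) : String :=
  String.ofList (s.toList.map (fun c => hackMap.getD c c))

-- ===== PRECONDITION & SPEC =====
def Spec_fn_hack_3 (s : String) (out : String) : Prop := out = fn_hack_3_alt s
instance (s : String) (out : String) : Decidable (Spec_fn_hack_3 s out) := by unfold Spec_fn_hack_3; infer_instance

-- ===== CLAIM (what is proved, stated in full; the proofs are below) =====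
def Claim_equal_fn_hack_3 : Prop := ∀ (s : String), Dom_fn_hack_3 s → Spec_fn_hack_3 s (fn_hack_3 s)

-- ===== LEMMAS AND PROOFS =====

-- the substitution both programs perform, as a plain reference function
def fRef (c : Char) : Char :=
  if c = 'a' then '@' else if c = 'e' then '3' else if c = 'i' then '¡' else
  if c = 'o' then '0' else if c = 'u' then 'v' else if c = 'q' then 'Q' else
  if c = 'x' then 'X' else if c = 'n' then 'N' else if c = 'f' then 'F' else
  if c = 'b' then 'B' else c

-- per-character effect of ONE iteration of A's outer loop (loop variable x)
def mm (x c : Char) : Char := if c = x then fRef x else c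

-- composite per-character effect of A's outer loop over the list of loop characters
def GG : List Char → Char → Char
  | [], a => a
  | c :: cs, a => GG cs (mm c a)

-- per-character effect of one replace() guarded by 'leter0 == leters1[i]'
def pf (x c1 c2 c : Char) : Char := if x = c1 ∧ c = c1 then c2 else c

-- A's outer/inner loop bodies, named (rfl-equal to the lambdas in fn_hack_3)
def innerStep (x : Char) (result : String) (i : Int) : String :=
  match PySem.List.pyGet? hackLeters1 i, PySem.List.pyGet? hackLeters2 i with
  | some c1, some c2 =>
      if x = c1 then PySem.Str.replace result (String.ofList [c1]) (String.ofList [c2])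
      else result
  | _, _ => result

def outerStep (result : String) (leter0 : Char) : String :=
  (PySem.List.pyRange 0 (hackLeters1.length : Int) 1).foldl (innerStep leter0) result

theorem fn_hack_3_eq_foldl (s : String) : fn_hack_3 s = s.toList.foldl outerStep s := rfl

theorem go_single (x y : Char) : ∀ (fuel : Nat) (l acc : List Char), l.length ≤ fuel →
    PySem.Chars.replace.go [x] [y] fuel l acc
      = acc.reverse ++ l.map (fun c => if c = x then y else c) := by
  intro fuel
  induction fuel with
  | zero =>
    intro l acc h
    have : l = [] := List.eq_nil_of_length_eq_zero (Nat.le_zero.mp h)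
    subst this; simp [PySem.Chars.replace.go]
  | succ n ih =>
    intro l acc h
    cases l with
    | nil => simp [PySem.Chars.replace.go]
    | cons c t =>
      simp only [PySem.Chars.replace.go]
      by_cases hc : c = x
      · subst hc
        simp only [List.isPrefixOf, BEq.rfl, Bool.and_true, if_pos]
        rw [ih]
        · simp
        · simpa using Nat.le_of_succ_le_succ (by simpa using h)
      · rw [if_neg, ih]
        · simp [hc]
        · simpa using Nat.le_of_succ_le_succ (by simpa using h)
        · simp [List.isPrefixOf]; exact fun hxc => absurd hxc.symm hc

theorem replace_single (cs : List Char) (x y : Char) :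
    PySem.Chars.replace cs [x] [y] = cs.map (fun c => if c = x then y else c) := by
  rw [PySem.Chars.replace]
  simp [go_single x y cs.length cs [] le_rfl]

-- one guarded replace(), seen per character
theorem guarded_replace_toList (x c1 c2 : Char) (r : String) :
    (if x = c1 then PySem.Str.replace r (String.ofList [c1]) (String.ofList [c2]) else r).toList
      = r.toList.map (pf x c1 c2) := by
  by_cases h : x = c1
  · subst h
    rw [if_pos rfl, PySem.Str.toList_replace, String.toList_ofList, String.toList_ofList,
      replace_single]
    exact List.map_congr_left (fun a _ => by by_cases ha : a = x <;> simp [pf, ha])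
  · rw [if_neg h]
    conv_lhs => rw [← List.map_id r.toList]
    exact List.map_congr_left (fun a _ => by simp [pf, h])

theorem innerStep_toList (x : Char) (r : String) (i : Int) (c1 c2 : Char)
    (h1 : PySem.List.pyGet? hackLeters1 i = some c1)
    (h2 : PySem.List.pyGet? hackLeters2 i = some c2) :
    (innerStep x r i).toList = r.toList.map (pf x c1 c2) := by
  rw [innerStep, h1, h2]
  exact guarded_replace_toList x c1 c2 r

-- the chain of the ten guarded replaces equals A's per-iteration character map mm x
theorem pf_chain (x c : Char) :
    pf x 'b' 'B' (pf x 'f' 'F' (pf x 'n' 'N' (pf x 'x' 'X' (pf x 'q' 'Q' (pf x 'u' 'v'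
      (pf x 'o' '0' (pf x 'i' '¡' (pf x 'e' '3' (pf x 'a' '@' c))))))))) = mm x c := by
  by_cases h1 : x = 'a'; · subst h1; by_cases hc : c = 'a' <;> simp [pf, mm, fRef, hc]
  by_cases h2 : x = 'e'; · subst h2; by_cases hc : c = 'e' <;> simp [pf, mm, fRef, hc]
  by_cases h3 : x = 'i'; · subst h3; by_cases hc : c = 'i' <;> simp [pf, mm, fRef, hc]
  by_cases h4 : x = 'o'; · subst h4; by_cases hc : c = 'o' <;> simp [pf, mm, fRef, hc]
  by_cases h5 : x = 'u'; · subst h5; by_cases hc : c = 'u' <;> simp [pf, mm, fRef, hc]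
  by_cases h6 : x = 'q'; · subst h6; by_cases hc : c = 'q' <;> simp [pf, mm, fRef, hc]
  by_cases h7 : x = 'x'; · subst h7; by_cases hc : c = 'x' <;> simp [pf, mm, fRef, hc]
  by_cases h8 : x = 'n'; · subst h8; by_cases hc : c = 'n' <;> simp [pf, mm, fRef, hc]
  by_cases h9 : x = 'f'; · subst h9; by_cases hc : c = 'f' <;> simp [pf, mm, fRef, hc]
  by_cases h10 : x = 'b'; · subst h10; by_cases hc : c = 'b' <;> simp [pf, mm, fRef, hc]
  have hfx : fRef x = x := by simp [fRef, h1, h2, h3, h4, h5, h6, h7, h8, h9, h10]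
  by_cases hc : c = x
  · simp [pf, mm, hc, hfx, h1, h2, h3, h4, h5, h6, h7, h8, h9, h10]
  · simp [pf, mm, hc, h1, h2, h3, h4, h5, h6, h7, h8, h9, h10]

-- A's inner loop maps every character through mm x
theorem outerStep_toList (r : String) (x : Char) :
    (outerStep r x).toList = r.toList.map (mm x) := by
  have hr : PySem.List.pyRange 0 (hackLeters1.length : Int) 1 = [0,1,2,3,4,5,6,7,8,9] := by
    decide
  rw [outerStep, hr]
  simp only [List.foldl]
  rw [innerStep_toList x _ 9 'b' 'B' (by decide) (by decide),
      innerStep_toList x _ 8 'f' 'F' (by decide) (by decide),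
      innerStep_toList x _ 7 'n' 'N' (by decide) (by decide),
      innerStep_toList x _ 6 'x' 'X' (by decide) (by decide),
      innerStep_toList x _ 5 'q' 'Q' (by decide) (by decide),
      innerStep_toList x _ 4 'u' 'v' (by decide) (by decide),
      innerStep_toList x _ 3 'o' '0' (by decide) (by decide),
      innerStep_toList x _ 2 'i' '¡' (by decide) (by decide),
      innerStep_toList x _ 1 'e' '3' (by decide) (by decide),
      innerStep_toList x _ 0 'a' '@' (by decide) (by decide)]
  simp only [List.map_map]
  exact List.map_congr_left (fun c _ => pf_chain x c)

-- A's whole loop nest maps every character through GG cs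
theorem foldl_outerStep_toList (cs : List Char) : ∀ (r : String),
    (cs.foldl outerStep r).toList = r.toList.map (GG cs) := by
  induction cs with
  | nil => intro r; simp [GG]
  | cons c cs ih =>
    intro r
    rw [List.foldl_cons, ih, outerStep_toList, List.map_map]
    exact List.map_congr_left (fun a _ => by simp [GG])

theorem fRef_idem (a : Char) : fRef (fRef a) = fRef a := by
  by_cases h1 : a = 'a'; · subst h1; decide
  by_cases h2 : a = 'e'; · subst h2; decide
  by_cases h3 : a = 'i'; · subst h3; decide
  by_cases h4 : a = 'o'; · subst h4; decide
  by_cases h5 : a = 'u'; · subst h5; decide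
  by_cases h6 : a = 'q'; · subst h6; decide
  by_cases h7 : a = 'x'; · subst h7; decide
  by_cases h8 : a = 'n'; · subst h8; decide
  by_cases h9 : a = 'f'; · subst h9; decide
  by_cases h10 : a = 'b'; · subst h10; decide
  simp [fRef, h1, h2, h3, h4, h5, h6, h7, h8, h9, h10]

-- a fixpoint of fRef is untouched by every later loop iteration
theorem GG_fix (y : Char) (hy : fRef y = y) : ∀ cs : List Char, GG cs y = y := by
  intro cs
  induction cs with
  | nil => rfl
  | cons c cs ih =>
    have hmm : mm c y = y := by
      by_cases h : y = c
      · subst h; simp [mm, hy]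
      · simp [mm, h]
    simp [GG, hmm, ih]

-- every character occurring in the loop list ends up substituted by fRef
theorem GG_mem (a : Char) : ∀ cs : List Char, a ∈ cs → GG cs a = fRef a := by
  intro cs
  induction cs with
  | nil => intro h; cases h
  | cons c cs ih =>
    intro h
    by_cases hac : a = c
    · subst hac
      have : mm a a = fRef a := by simp [mm]
      rw [GG, this]
      exact GG_fix (fRef a) (fRef_idem a) cs
    · have hmem : a ∈ cs := by cases h with
        | head => exact absurd rfl hac
        | tail _ h => exact h
      have : mm c a = a := by simp [mm, hac]
      rw [GG, this]
      exact ih hmem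

set_option maxHeartbeats 1000000 in
theorem dict_getD_eq_fRef (c : Char) : hackMap.getD c c = fRef c := by
  simp only [hackMap, PySem.Dict.ofList, fRef, List.zip, List.zipWith, PySem.Dict.update,
    List.foldl, PySem.Dict.getD_insert, PySem.Dict.getD_empty]
  split_ifs <;> first | rfl | (exfalso; simp_all)

-- ===== VERDICT (by name: the statement is the Claim_ definition above) =====
theorem fn_hack_3_spec : Claim_equal_fn_hack_3 := by
  intro s _
  unfold Spec_fn_hack_3
  have hA : (fn_hack_3 s).toList = s.toList.map fRef := by
    rw [fn_hack_3_eq_foldl, foldl_outerStep_toList]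
    exact List.map_congr_left (fun a ha => GG_mem a s.toList ha)
  have hB : (fn_hack_3_alt s).toList = s.toList.map fRef := by
    rw [fn_hack_3_alt, String.toList_ofList]
    exact List.map_congr_left (fun a _ => dict_getD_eq_fRef a)
  have := congrArg String.ofList (hA.trans hB.symm)
  simpa using this
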